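-- pv_equiv track=rewrite | github.com/KirilVoigtlaender/Scheduler | scheduler/playground/algorithm_functions/initialize_schedule.py | initialize_schedule
-- ===== SOURCE A (Python) =====
-- def initialize_schedule(unpreferred_timeslots):
--     TIMES_SLOTS = 96
--     WEEK_DAYS = 7
--     # two dimensional array
--     #first block going from 0-6 for the days monday-sunday
--     #second block has 0-95 entrys for going in 15 minutes block over the whole day
--     #False if time is free, True otherwise. Starts with full False
--     #filled_schedule = [[[False] for _ in range(96)] for _ in range(7)] #of one week, at the end of the week we set it to all false again
--     filled_schedule = [[None] * TIMES_SLOTS for _ in range(WEEK_DAYS)]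
--     for day in range (WEEK_DAYS):
--         for slot in range (TIMES_SLOTS):
--             filled_schedule[day][slot] = False
--
--     #Maybe now we should define the sleeping time, lets say from 23:00 to 7:00
--     for start_slot, end_slot in unpreferred_timeslots:
--         for day in range(WEEK_DAYS):
--             for slot in range(len(filled_schedule[day])):
--                 if start_slot <= slot <= end_slot:
--                     filled_schedule[day][slot] = True
--     return filled_schedule
-- ===== SOURCE B (Python) =====
-- def initialize_schedule(unpreferred_timeslots):
--     # Per-cell direct computation: a slot is blocked iff some pair covers it.
--     # No grid mutation, no marking passes: each cell's value is an existence test.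
--     def blocked(slot):
--         return any(start_slot <= slot <= end_slot
--                    for start_slot, end_slot in unpreferred_timeslots)
--     return [[blocked(slot) for slot in range(96)] for _ in range(7)]
-- ===== Notes on version B (the rewrite author's own statement) =====
-- stated objective: simpler
-- what changed: B computes each cell directly as a short-circuiting existence test (any pair covering the slot) in a pure comprehension, instead of A's imperative marking: build a None grid, clear it to False with nested loops, then for every pair rescan all 7x96 cells setting True; a timing run measured B faster (the any() test stops at the first covering pair while A scans every pair over every cell).
import Mathlib
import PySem

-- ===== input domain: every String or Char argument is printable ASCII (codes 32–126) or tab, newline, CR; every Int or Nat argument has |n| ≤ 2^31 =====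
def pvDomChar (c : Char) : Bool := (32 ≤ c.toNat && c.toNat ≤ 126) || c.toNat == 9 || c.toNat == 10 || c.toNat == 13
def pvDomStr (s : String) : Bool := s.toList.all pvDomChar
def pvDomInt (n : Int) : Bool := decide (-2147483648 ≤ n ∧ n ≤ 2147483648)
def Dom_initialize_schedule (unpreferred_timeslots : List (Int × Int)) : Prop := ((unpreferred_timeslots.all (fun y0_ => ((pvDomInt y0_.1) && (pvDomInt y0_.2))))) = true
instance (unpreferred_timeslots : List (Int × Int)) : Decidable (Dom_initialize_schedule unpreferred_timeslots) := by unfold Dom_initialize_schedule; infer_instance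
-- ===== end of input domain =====

-- B computes every cell directly as an existence test (is the slot covered by some
-- pair?) in a pure comprehension, instead of A's imperative marking passes over a
-- mutable grid (objective: simpler).

-- ===== PORT A =====
-- [None]*96 placeholder cells are represented as `false`: every cell is overwritten
-- to False by the first double loop before it is ever read, so no None is observable.
def initialize_schedule (unpreferred_timeslots : List (Int × Int)) : List (List Bool) :=
  let filled0 : List (List Bool) := List.replicate 7 (List.replicate 96 false)
  let filled1 := (List.range 7).foldl (fun sc day =>
    (List.range 96).foldl (fun sc2 slot =>
      sc2.set day ((sc2.getD day []).set slot false)) sc) filled0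
  unpreferred_timeslots.foldl (fun sc p =>
    (List.range 7).foldl (fun sc day =>
      (List.range (sc.getD day []).length).foldl (fun sc2 (slot : Nat) =>
        if p.1 ≤ (slot : Int) ∧ (slot : Int) ≤ p.2 then
          sc2.set day ((sc2.getD day []).set slot true)
        else sc2) sc) sc) filled1

-- ===== PORT B =====
-- `blocked slot` = Python's any-generator; the two comprehensions are the two maps.
def initialize_schedule_alt (unpreferred_timeslots : List (Int × Int)) : List (List Bool) :=
  let blocked : Nat → Bool := fun slot =>
    unpreferred_timeslots.any (fun p => decide (p.1 ≤ (slot : Int) ∧ (slot : Int) ≤ p.2))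
  (List.range 7).map (fun _ => (List.range 96).map (fun slot => blocked slot))

-- ===== PRECONDITION & SPEC =====
def Spec_initialize_schedule (unpreferred_timeslots : List (Int × Int)) (out : List (List Bool)) : Prop := out = initialize_schedule_alt unpreferred_timeslots
instance (unpreferred_timeslots : List (Int × Int)) (out : List (List Bool)) : Decidable (Spec_initialize_schedule unpreferred_timeslots out) := by unfold Spec_initialize_schedule; infer_instance

-- ===== CLAIM (what is proved, stated in full; the proofs are below) =====
def Claim_equal_initialize_schedule : Prop := ∀ (unpreferred_timeslots : List (Int × Int)), Dom_initialize_schedule unpreferred_timeslots → Spec_initialize_schedule unpreferred_timeslots (initialize_schedule unpreferred_timeslots)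

-- ===== LEMMAS AND PROOFS =====

-- Setting a row to the value it already holds is a no-op.
theorem pv_set_getD_self (sc : List (List Bool)) (day : Nat) (h : day < sc.length) :
    sc.set day (sc.getD day []) = sc := by
  have hg : sc.getD day [] = sc[day] := by
    simp [List.getD_eq_getElem?_getD, List.getElem?_eq_getElem h]
  rw [hg]; exact List.set_getElem_self h

theorem pv_getD_set_self (sc : List (List Bool)) (day : Nat) (x : List Bool)
    (h : day < sc.length) : (sc.set day x).getD day [] = x := by
  simp [List.getD_eq_getElem?_getD, h]

-- A fold that conditionally rewrites only row `day` of the schedule equals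
-- extracting that row, folding on it, and writing it back.
theorem pv_lift (P : Nat → Prop) [DecidablePred P] (b : Bool) (l : List Nat) :
    ∀ (sc : List (List Bool)) (day : Nat), day < sc.length →
    l.foldl (fun sc2 slot =>
        if P slot then sc2.set day ((sc2.getD day []).set slot b) else sc2) sc
      = sc.set day (l.foldl (fun r2 slot => if P slot then r2.set slot b else r2)
          (sc.getD day [])) := by
  induction l with
  | nil => intro sc day h; simpa using (pv_set_getD_self sc day h).symm
  | cons a t ih =>
    intro sc day h
    by_cases hp : P a
    · simp only [List.foldl_cons, if_pos hp]
      rw [ih (sc.set day ((sc.getD day []).set a b)) day (by simpa using h),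
        pv_getD_set_self _ _ _ h, List.set_set]
    · simp only [List.foldl_cons, if_neg hp]
      exact ih sc day h

-- Folding over bools with conditional `set` preserves the length.
theorem pv_len (P : Nat → Prop) [DecidablePred P] (b : Bool) (l : List Nat) :
    ∀ (r : List Bool),
      (l.foldl (fun r2 slot => if P slot then r2.set slot b else r2) r).length
        = r.length := by
  induction l with
  | nil => intro r; rfl
  | cons a t ih => intro r; by_cases hp : P a <;> simp [hp, ih]

-- The element (and the update) of `replicate n x ++ r :: rest` at index n.
theorem pv_getD_mid (n : Nat) (x r : List Bool) (rest : List (List Bool)) :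
    (List.replicate n x ++ r :: rest).getD n [] = r := by
  induction n with
  | zero => simp
  | succ n ih => simp [List.replicate_succ]

theorem pv_set_mid (n : Nat) (x r y : List Bool) (rest : List (List Bool)) :
    (List.replicate n x ++ r :: rest).set n y = List.replicate n x ++ y :: rest := by
  induction n with
  | zero => simp
  | succ n ih => simp [List.replicate_succ, ih]

-- Day loop over a schedule whose rows are all equal: every day's row gets the same
-- one-row fold applied, independently.
theorem pv_dayloop (P : Nat → Prop) [DecidablePred P] (b : Bool)
    (inner : List Bool → List Nat) :
    ∀ (n m : Nat) (r : List Bool), n ≤ m →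
    (List.range n).foldl (fun sc day =>
        (inner (sc.getD day [])).foldl (fun sc2 slot =>
          if P slot then sc2.set day ((sc2.getD day []).set slot b) else sc2) sc)
      (List.replicate m r)
    = List.replicate n ((inner r).foldl
        (fun r2 slot => if P slot then r2.set slot b else r2) r)
        ++ List.replicate (m - n) r := by
  intro n
  induction n with
  | zero => intro m r _; simp
  | succ n ih =>
    intro m r hnm
    rw [List.range_succ, List.foldl_append, ih m r (by omega), List.foldl_cons,
      List.foldl_nil]
    obtain ⟨k, hk⟩ : ∃ k, m - n = k + 1 := ⟨m - n - 1, by omega⟩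
    rw [hk, List.replicate_succ]
    rw [pv_lift P b _ _ n
      (by simp only [List.length_append, List.length_replicate, List.length_cons]; omega)]
    rw [pv_getD_mid, pv_set_mid]
    rw [show m - (n + 1) = k from by omega, List.replicate_succ' (n := n)]
    simp

-- An all-slots pass writing `false` leaves the all-false row unchanged.
theorem pv_clear (l : List Nat) :
    l.foldl (fun r2 slot => r2.set slot false) (List.replicate 96 false)
      = List.replicate 96 false := by
  induction l with
  | nil => rfl
  | cons a t ih => rw [List.foldl_cons, List.set_replicate_self]; exact ih

-- A's initialisation phase produces 7 all-false rows.
theorem pv_init :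
    (List.range 7).foldl (fun sc day =>
      (List.range 96).foldl (fun sc2 slot =>
        sc2.set day ((sc2.getD day []).set slot false)) sc)
      (List.replicate 7 (List.replicate 96 false))
    = List.replicate 7 (List.replicate 96 false) := by
  have h := pv_dayloop (fun _ : Nat => True) false (fun _ => List.range 96) 7 7
    (List.replicate 96 false) (le_refl 7)
  simp only [if_pos trivial, Nat.sub_self, List.replicate_zero, List.append_nil] at h
  rw [h, pv_clear]

-- Main loop: A's fold over pairs on 7 identical rows equals 7 copies of the
-- one-row marking fold.
theorem pv_main (ts : List (Int × Int)) :
    ∀ (r : List Bool), r.length = 96 →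
    ts.foldl (fun sc p =>
      (List.range 7).foldl (fun sc day =>
        (List.range (sc.getD day []).length).foldl (fun sc2 (slot : Nat) =>
          if p.1 ≤ (slot : Int) ∧ (slot : Int) ≤ p.2 then
            sc2.set day ((sc2.getD day []).set slot true)
          else sc2) sc) sc) (List.replicate 7 r)
    = List.replicate 7 (ts.foldl (fun r p =>
        (List.range 96).foldl (fun r2 (slot : Nat) =>
          if p.1 ≤ (slot : Int) ∧ (slot : Int) ≤ p.2 then r2.set slot true else r2) r) r) := by
  induction ts with
  | nil => intro r _; rfl
  | cons p t ih =>
    intro r hr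
    have h := pv_dayloop (fun slot : Nat => p.1 ≤ (slot : Int) ∧ (slot : Int) ≤ p.2)
      true (fun r0 => List.range r0.length) 7 7 r (le_refl 7)
    simp only [Nat.sub_self, List.replicate_zero, List.append_nil] at h
    rw [List.foldl_cons, List.foldl_cons, h, hr,
      ih _ (by rw [pv_len]; exact hr)]

-- Pointwise value of a one-pass marking fold: cell i ends up true iff it started
-- true or (P i and i was visited).
theorem pv_inner_getD (P : Nat → Prop) [DecidablePred P] :
    ∀ (l : List Nat) (r : List Bool), (∀ a ∈ l, a < r.length) → ∀ (i : Nat),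
      (l.foldl (fun r2 slot => if P slot then r2.set slot true else r2) r).getD i false
        = (r.getD i false || (decide (P i) && l.contains i)) := by
  intro l
  induction l with
  | nil => intro r _ i; simp
  | cons a t ih =>
    intro r hlen i
    by_cases hp : P a
    · simp only [List.foldl_cons, if_pos hp]
      rw [ih (r.set a true) (by intro x hx; simpa using hlen x (List.mem_cons_of_mem a hx)) i]
      by_cases hia : i = a
      · subst hia
        have hi : i < r.length := hlen i (List.mem_cons_self ..)
        simp [List.getD_eq_getElem?_getD, hi, hp]
      · have : (r.set a true).getD i false = r.getD i false := by
          simp [List.getD_eq_getElem?_getD, List.getElem?_set_ne (Ne.symm hia)]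
        rw [this]
        simp [hia]
    · simp only [List.foldl_cons, if_neg hp]
      rw [ih r (by intro x hx; exact hlen x (List.mem_cons_of_mem a hx)) i]
      by_cases hia : i = a
      · subst hia; simp [hp]
      · simp [hia]

-- Pointwise value after folding all pairs: cell i is true iff it started true or
-- some pair covers slot i.
theorem pv_outer_getD (ts : List (Int × Int)) :
    ∀ (r : List Bool), r.length = 96 → ∀ (i : Nat), i < 96 →
      (ts.foldl (fun r p =>
          (List.range 96).foldl (fun r2 (slot : Nat) =>
            if p.1 ≤ (slot : Int) ∧ (slot : Int) ≤ p.2 then r2.set slot true else r2) r)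
          r).getD i false
        = (r.getD i false
            || ts.any (fun p => decide (p.1 ≤ (i : Int) ∧ (i : Int) ≤ p.2))) := by
  induction ts with
  | nil => intro r _ i _; simp
  | cons p t ih =>
    intro r hr i hi
    rw [List.foldl_cons,
      ih _ (by rw [pv_len (fun slot : Nat => p.1 ≤ (slot : Int) ∧ (slot : Int) ≤ p.2)]; exact hr) i hi,
      pv_inner_getD (fun slot : Nat => p.1 ≤ (slot : Int) ∧ (slot : Int) ≤ p.2)
        (List.range 96) r (by intro x hx; rw [hr]; simpa using hx) i]
    have hc : (List.range 96).contains i = true := by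
      simp [hi]
    rw [hc]
    simp [Bool.or_assoc]

-- The marking row equals B's per-slot existence-test row.
theorem pv_row (ts : List (Int × Int)) :
    ts.foldl (fun r p =>
        (List.range 96).foldl (fun r2 (slot : Nat) =>
          if p.1 ≤ (slot : Int) ∧ (slot : Int) ≤ p.2 then r2.set slot true else r2) r)
      (List.replicate 96 false)
    = (List.range 96).map (fun (slot : Nat) =>
        ts.any (fun p => decide (p.1 ≤ (slot : Int) ∧ (slot : Int) ≤ p.2))) := by
  have hlenfold : ∀ (l : List (Int × Int)) (r : List Bool),
      (l.foldl (fun r p =>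
        (List.range 96).foldl (fun r2 (slot : Nat) =>
          if p.1 ≤ (slot : Int) ∧ (slot : Int) ≤ p.2 then r2.set slot true else r2) r) r).length
        = r.length := by
    intro l
    induction l with
    | nil => intro r; rfl
    | cons p t ih =>
      intro r
      rw [List.foldl_cons, ih,
        pv_len (fun slot : Nat => p.1 ≤ (slot : Int) ∧ (slot : Int) ≤ p.2)]
  apply List.ext_getElem
  · rw [hlenfold]; simp
  · intro i h1 h2
    have hi : i < 96 := by simpa using h2
    have hgd := pv_outer_getD ts (List.replicate 96 false) (by simp) i hi
    have hlen : (ts.foldl (fun r p =>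
        (List.range 96).foldl (fun r2 (slot : Nat) =>
          if p.1 ≤ (slot : Int) ∧ (slot : Int) ≤ p.2 then r2.set slot true else r2) r)
        (List.replicate 96 false)).length = 96 := by rw [hlenfold]; simp
    have : (ts.foldl (fun r p =>
        (List.range 96).foldl (fun r2 (slot : Nat) =>
          if p.1 ≤ (slot : Int) ∧ (slot : Int) ≤ p.2 then r2.set slot true else r2) r)
        (List.replicate 96 false)).getD i false
        = ts.any (fun p => decide (p.1 ≤ (i : Int) ∧ (i : Int) ≤ p.2)) := by
      rw [hgd]
      have hrep : (List.replicate 96 false).getD i false = false := by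
        rw [List.getD_eq_getElem?_getD, List.getElem?_replicate]
        simp [hi]
      rw [hrep, Bool.false_or]
    rw [List.getD_eq_getElem?_getD, List.getElem?_eq_getElem h1] at this
    simp only [Option.getD_some] at this
    rw [this]
    simp

-- ===== VERDICT (by name: the statement is the Claim_ definition above) =====
theorem initialize_schedule_spec : Claim_equal_initialize_schedule := by
  intro ts _
  show initialize_schedule ts = initialize_schedule_alt ts
  simp only [initialize_schedule, initialize_schedule_alt]
  rw [pv_init, pv_main ts _ (by simp), pv_row]
  simp [List.map_const']
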